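-- pv_equiv track=rewrite | github.com/LiuzLab/RareCollab | src/RareCollab/Integration.py | best_tandem_repeat
-- ===== SOURCE A (Python) =====
-- def best_tandem_repeat(seq: str, min_k: int = 1, max_k: int = 6, min_repeats: int = 3):
--     n = len(seq)
--     best_k, best_motif, best_rep = 0, "", 0
--
--     for k in range(min_k, min(max_k, n // min_repeats) + 1):
--         for i in range(n - k * min_repeats + 1):
--             motif = seq[i:i+k]
--             if "N" in motif:
--                 continue
--
--             rep = 1
--             j = i + k
--             while j + k <= n and seq[j:j+k] == motif:
--                 rep += 1
--                 j += k
--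
--             if rep >= min_repeats and rep > best_rep:
--                 best_k, best_motif, best_rep = k, motif, rep
--
--     return best_k, best_motif, best_rep
-- ===== SOURCE B (Python) =====
-- def best_tandem_repeat(seq: str, min_k: int = 1, max_k: int = 6, min_repeats: int = 3):
--     n = len(seq)
--     best_k, best_motif, best_rep = 0, "", 0
--
--     for k in range(min_k, min(max_k, n // min_repeats) + 1):
--         # rep[i] = number of consecutive copies of seq[i:i+k] starting at i,
--         # filled right-to-left with one adjacent-block comparison per position
--         # instead of re-scanning the whole run for every start.
--         rep = [1] * (n + 1)
--         for i in reversed(range(n - 2 * k + 1)):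
--             if seq[i:i+k] == seq[i+k:i+2*k]:
--                 rep[i] = rep[i + k] + 1
--
--         for i in range(n - k * min_repeats + 1):
--             r = rep[i]
--             if r >= min_repeats and r > best_rep and "N" not in seq[i:i+k]:
--                 best_k, best_motif, best_rep = k, seq[i:i+k], r
--
--     return best_k, best_motif, best_rep
-- ===== Notes on version B (the rewrite author's own statement) =====
-- stated objective: alternative
-- what changed: Instead of re-scanning the whole run from every start position with an inner while loop, B precomputes per motif length k a right-to-left DP array rep with rep[i] = rep[i+k]+1 when adjacent k-blocks match, so each candidate's repeat count is a single lookup.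
-- outside the precondition, e.g. on best_tandem_repeat('ABCD', -2, 6, -2): A returns (-2, 'AB', 1), B raises IndexError
import Mathlib
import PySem

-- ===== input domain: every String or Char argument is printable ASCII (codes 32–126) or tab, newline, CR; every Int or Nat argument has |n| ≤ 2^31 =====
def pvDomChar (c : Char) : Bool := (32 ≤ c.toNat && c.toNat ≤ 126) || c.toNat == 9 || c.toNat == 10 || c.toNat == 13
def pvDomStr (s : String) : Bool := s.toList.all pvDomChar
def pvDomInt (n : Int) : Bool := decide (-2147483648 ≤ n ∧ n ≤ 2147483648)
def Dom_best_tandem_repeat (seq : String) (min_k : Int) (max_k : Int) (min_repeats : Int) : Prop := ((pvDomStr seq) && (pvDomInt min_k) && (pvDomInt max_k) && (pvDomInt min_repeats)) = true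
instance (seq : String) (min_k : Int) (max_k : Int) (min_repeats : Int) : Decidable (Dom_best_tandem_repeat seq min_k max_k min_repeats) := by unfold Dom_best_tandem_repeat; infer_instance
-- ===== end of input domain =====

-- B replaces A's per-start inner while-loop rescans by a per-k right-to-left DP array of
-- repeat counts (one adjacent-block comparison per position), removing the rescans on repeat-heavy input.

-- ===== PORT A =====
-- A's inner while loop: rep = 1; j = i + k; while j + k <= n and seq[j:j+k] == motif: rep += 1; j += k.
-- The fuel argument only makes the loop total in Lean; inside Pre_ (every iterated k is ≥ 1)
-- fuel = n + 1 is never exhausted.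
def pvAwhile (cs : List Char) (motif : List Char) (n : Int) (k : Int) : Nat → Int → Int → Int
  | 0, rep, _ => rep
  | fuel+1, rep, j =>
    if j + k ≤ n ∧ PySem.List.slice cs (some j) (some (j + k)) = motif then
      pvAwhile cs motif n k fuel (rep + 1) (j + k)
    else rep

def best_tandem_repeat (seq : String) (min_k : Int) (max_k : Int) (min_repeats : Int) : Int × String × Int :=
  let cs := seq.toList
  let n : Int := cs.length
  (PySem.List.pyRange min_k (min max_k (PySem.Int.floordiv n min_repeats) + 1)).foldl
    (fun best k =>
      (PySem.List.pyRange 0 (n - k * min_repeats + 1)).foldl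
        (fun best i =>
          let motif := PySem.List.slice cs (some i) (some (i + k))
          if PySem.Chars.isIn ['N'] motif then best
          else
            let rep := pvAwhile cs motif n k (cs.length + 1) 1 (i + k)
            if min_repeats ≤ rep ∧ best.2.2 < rep then (k, String.ofList motif, rep) else best)
        best)
    (0, "", 0)

-- ===== PORT B =====
-- one DP step of B: if seq[i:i+k] == seq[i+k:i+2*k]: rep[i] = rep[i+k] + 1.
-- Inside Pre_ both indices are in range, so List.set / pyGetD are exactly Python's
-- list assignment / lookup there.
def pvUpd (cs : List Char) (k : Int) (rep : List Int) (i : Int) : List Int :=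
  if PySem.List.slice cs (some i) (some (i + k)) =
     PySem.List.slice cs (some (i + k)) (some (i + 2 * k)) then
    rep.set i.toNat (PySem.List.pyGetD rep (i + k) 1 + 1)
  else rep

def best_tandem_repeat_alt (seq : String) (min_k : Int) (max_k : Int) (min_repeats : Int) : Int × String × Int :=
  let cs := seq.toList
  let n : Int := cs.length
  (PySem.List.pyRange min_k (min max_k (PySem.Int.floordiv n min_repeats) + 1)).foldl
    (fun best k =>
      let rep : List Int :=
        ((PySem.List.pyRange 0 (n - 2 * k + 1)).reverse).foldl (pvUpd cs k)
          (List.replicate (cs.length + 1) 1)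
      (PySem.List.pyRange 0 (n - k * min_repeats + 1)).foldl
        (fun best i =>
          let r := PySem.List.pyGetD rep i 1
          if min_repeats ≤ r ∧ best.2.2 < r ∧
             PySem.Chars.isIn ['N'] (PySem.List.slice cs (some i) (some (i + k))) = false then
            (k, String.ofList (PySem.List.slice cs (some i) (some (i + k))), r)
          else best)
        best)
    (0, "", 0)

-- ===== PRECONDITION & SPEC =====
-- Pre_ excludes exactly: min_repeats = 0, where Python A raises ZeroDivisionError; and a
-- nonempty k-loop that starts at a nonpositive min_k, where A either loops forever
-- (j += k no longer advances) or returns an accidental negative-slice-wraparound motif value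
-- while B's DP array indexing raises IndexError.
def Pre_best_tandem_repeat (seq : String) (min_k : Int) (max_k : Int) (min_repeats : Int) : Prop :=
  min_repeats ≠ 0 ∧
  (1 ≤ min_k ∨ max_k < min_k ∨
    PySem.Int.floordiv (seq.toList.length : Int) min_repeats < min_k)
instance (seq : String) (min_k : Int) (max_k : Int) (min_repeats : Int) : Decidable (Pre_best_tandem_repeat seq min_k max_k min_repeats) := by unfold Pre_best_tandem_repeat; infer_instance

def pvWitness_best_tandem_repeat : String × Int × Int × Int := ("ABAB", 1, 6, 2)

def Spec_best_tandem_repeat (seq : String) (min_k : Int) (max_k : Int) (min_repeats : Int) (out : Int × String × Int) : Prop := out = best_tandem_repeat_alt seq min_k max_k min_repeats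
instance (seq : String) (min_k : Int) (max_k : Int) (min_repeats : Int) (out : Int × String × Int) : Decidable (Spec_best_tandem_repeat seq min_k max_k min_repeats out) := by unfold Spec_best_tandem_repeat; infer_instance

-- ===== CLAIM (what is proved, stated in full; the proofs are below) =====
def Claim_equal_best_tandem_repeat : Prop := ∀ (seq : String) (min_k : Int) (max_k : Int) (min_repeats : Int), Dom_best_tandem_repeat seq min_k max_k min_repeats → Pre_best_tandem_repeat seq min_k max_k min_repeats → Spec_best_tandem_repeat seq min_k max_k min_repeats (best_tandem_repeat seq min_k max_k min_repeats)

-- ===== LEMMAS AND PROOFS =====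

-- the k-block of cs starting at position i
def pvBlock (cs : List Char) (K i : Nat) : List Char := (cs.drop i).take K

-- mathematical repeat count: number of consecutive copies of the k-block at i
def pvRepc (cs : List Char) (K : Nat) (hK : 0 < K) (i : Nat) : Int :=
  if h : i + 2 * K ≤ cs.length ∧ pvBlock cs K i = pvBlock cs K (i + K) then
    pvRepc cs K hK (i + K) + 1
  else 1
termination_by cs.length - i
decreasing_by omega

lemma pvSlice_block0 (cs : List Char) (K s : Nat) :
    PySem.List.slice cs (some (s : Int)) (some ((s : Int) + (K : Int))) = pvBlock cs K s := by
  have h1 : ((s:Int) + (K:Int)) = ((s + K : Nat) : Int) := by push_cast; ring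
  rw [h1, PySem.List.slice_natCast]
  simp [pvBlock]

lemma pvSlice_block (cs : List Char) (K i : Nat) :
    PySem.List.slice cs (some ((i : Int) + (K : Int))) (some (((i : Int) + (K : Int)) + (K : Int))) =
      pvBlock cs K (i + K) := by
  have h1 : ((i:Int) + (K:Int)) = ((i + K : Nat) : Int) := by push_cast; ring
  have h2 : (((i:Int) + (K:Int)) + (K:Int)) = ((i + K + K : Nat) : Int) := by push_cast; ring
  rw [h2, h1, PySem.List.slice_natCast]
  simp [pvBlock]

lemma pvSlice_block2 (cs : List Char) (K s : Nat) :
    PySem.List.slice cs (some ((s : Int) + (K : Int))) (some ((s : Int) + 2 * (K : Int))) =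
      pvBlock cs K (s + K) := by
  have h1 : ((s:Int) + (K:Int)) = ((s + K : Nat) : Int) := by push_cast; ring
  have h2 : ((s:Int) + 2 * (K:Int)) = ((s + K + K : Nat) : Int) := by push_cast; ring
  rw [h2, h1, PySem.List.slice_natCast]
  simp [pvBlock]

lemma pvAwhile_eq (cs : List Char) (K : Nat) (hK : 0 < K) :
    ∀ (fuel : Nat) (i : Nat) (motif : List Char) (rep : Int),
      motif = pvBlock cs K i → cs.length ≤ fuel + i →
      pvAwhile cs motif (cs.length : Int) (K : Int) fuel rep ((i : Int) + (K : Int)) =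
        rep + pvRepc cs K hK i - 1 := by
  intro fuel
  induction fuel with
  | zero =>
    intro i motif rep hm hf
    rw [pvRepc, dif_neg (by rintro ⟨h1, -⟩; omega)]
    show rep = rep + 1 - 1
    ring
  | succ f ih =>
    intro i motif rep hm hf
    simp only [pvAwhile]
    rw [pvSlice_block]
    by_cases hc : ((i:Int) + (K:Int)) + (K:Int) ≤ (cs.length : Int) ∧ pvBlock cs K (i + K) = motif
    · rw [if_pos hc]
      have hc1 := hc.1
      have hcast : (((i:Int) + (K:Int)) + (K:Int)) = (((i + K : Nat) : Int) + (K:Int)) := by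
        push_cast; ring
      have hrec : pvRepc cs K hK i = pvRepc cs K hK (i + K) + 1 := by
        rw [pvRepc, dif_pos ⟨(by omega : i + 2 * K ≤ cs.length), hm.symm.trans hc.2.symm⟩]
      rw [hcast, ih (i + K) motif (rep + 1) hc.2.symm (by omega), hrec]
      ring
    · rw [if_neg hc]
      rw [pvRepc, dif_neg (by rintro ⟨h1, h2⟩; exact hc ⟨by omega, h2.symm.trans hm.symm⟩)]
      ring

lemma pvRepList_get (cs : List Char) (K : Nat) (hK : 0 < K) :
    ∀ (t : Nat) (l : List Int), l.length = cs.length + 1 →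
      (∀ j : Nat, j < cs.length + 1 → l.getD j 1 = if t ≤ j then pvRepc cs K hK j else 1) →
      t + 2 * K ≤ cs.length + 1 →
      ∀ j : Nat, j < cs.length + 1 →
        (List.foldl (pvUpd cs (K : Int)) l ((PySem.List.pyRange 0 (t : Int)).reverse)).getD j 1 =
          pvRepc cs K hK j := by
  intro t
  induction t with
  | zero =>
    intro l hlen hinv _ j hj
    have : PySem.List.pyRange 0 ((0 : Nat) : Int) = [] := by decide
    rw [this]
    simpa using hinv j hj
  | succ s ih =>
    intro l hlen hinv hb j hj
    have hstep : PySem.List.pyRange 0 ((s + 1 : Nat) : Int) =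
        PySem.List.pyRange 0 (s : Int) ++ [(s : Int)] := by
      have : ((s + 1 : Nat) : Int) = (s : Int) + 1 := by push_cast; ring
      rw [this, PySem.List.pyRange_one_succ_right (by positivity)]
    rw [hstep, List.reverse_append]
    simp only [List.reverse_singleton, List.singleton_append, List.foldl_cons]
    have hsK : s + K < cs.length + 1 := by omega
    have hgetK : PySem.List.pyGetD l ((s : Int) + (K : Int)) 1 = pvRepc cs K hK (s + K) := by
      have h1 : ((s:Int) + (K:Int)) = ((s + K : Nat) : Int) := by push_cast; ring
      rw [h1, PySem.List.pyGetD_natCast]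
      rw [hinv (s + K) hsK, if_pos (by omega)]
    apply ih (pvUpd cs (K : Int) l (s : Int))
    · unfold pvUpd; split_ifs <;> simp [hlen]
    · intro j hj
      unfold pvUpd
      rw [pvSlice_block0, pvSlice_block2]
      by_cases hc : pvBlock cs K s = pvBlock cs K (s + K)
      · rw [if_pos hc, hgetK]
        have hrec : pvRepc cs K hK s = pvRepc cs K hK (s + K) + 1 := by
          rw [pvRepc, dif_pos ⟨(by omega : s + 2 * K ≤ cs.length), hc⟩]
        rw [List.getD_eq_getElem?_getD, Int.toNat_natCast, List.getElem?_set]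
        by_cases hjs : s = j
        · subst hjs
          rw [if_pos rfl, if_pos (by omega)]
          simp [hrec]
        · rw [if_neg hjs, ← List.getD_eq_getElem?_getD, hinv j hj]
          by_cases h2 : s ≤ j
          · rw [if_pos (by omega), if_pos h2]
          · rw [if_neg (by omega), if_neg h2]
      · rw [if_neg hc, hinv j hj]
        by_cases hjs : s = j
        · subst hjs
          rw [if_neg (by omega), if_pos (le_refl s)]
          rw [pvRepc, dif_neg (by rintro ⟨-, h⟩; exact hc h)]
        · by_cases h2 : s ≤ j
          · rw [if_pos (by omega), if_pos h2]
          · rw [if_neg (by omega), if_neg h2]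
    · omega
    · exact hj

lemma pvPyRange_nil_of_nonpos (b : Int) (hb : b ≤ 0) : PySem.List.pyRange 0 b = [] := by
  rw [List.eq_nil_iff_forall_not_mem]
  intro x hx
  have := PySem.List.mem_pyRange_one.mp hx
  omega

-- the finished DP list of B reads back pvRepc at every position
lemma pvRepList_final (cs : List Char) (K : Nat) (hK : 0 < K) (j : Nat) (hj : j < cs.length + 1) :
    (((PySem.List.pyRange 0 ((cs.length : Int) - 2 * (K : Int) + 1)).reverse).foldl
        (pvUpd cs (K : Int)) (List.replicate (cs.length + 1) 1)).getD j 1 =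
      pvRepc cs K hK j := by
  have hrepl : ∀ (t : Nat), (t + 2 * K = cs.length + 1) ∨ cs.length < 2 * K →
      ∀ j : Nat, j < cs.length + 1 →
      (List.replicate (cs.length + 1) (1 : Int)).getD j 1 = if t ≤ j then pvRepc cs K hK j else 1 := by
    intro t ht j hj
    rw [List.getD_eq_getElem?_getD, List.getElem?_replicate, if_pos hj]
    by_cases h2 : t ≤ j
    · rw [if_pos h2, pvRepc, dif_neg (by rintro ⟨h, -⟩; omega)]
      rfl
    · rw [if_neg h2]
      rfl
  by_cases hN : 2 * K ≤ cs.length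
  · have hcast : (cs.length : Int) - 2 * (K : Int) + 1 = ((cs.length - 2 * K + 1 : Nat) : Int) := by
      push_cast [hN]; ring
    rw [hcast]
    exact pvRepList_get cs K hK (cs.length - 2 * K + 1) _ (by simp)
      (hrepl _ (Or.inl (by omega))) (by omega) j hj
  · rw [pvPyRange_nil_of_nonpos _ (by omega), List.reverse_nil, List.foldl_nil]
    have := hrepl (cs.length + 1) (Or.inr (by omega)) j hj
    rw [this, if_neg (by omega), pvRepc, dif_neg (by rintro ⟨h, -⟩; omega)]

-- the two per-k loop bodies agree for every iterated k ≥ 1 (given min_repeats ≥ 1)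
lemma pvBody_eq (cs : List Char) (K : Nat) (hK : 0 < K) (min_repeats : Int)
    (hmr : 1 ≤ min_repeats) (best : Int × String × Int) :
    (PySem.List.pyRange 0 ((cs.length : Int) - (K : Int) * min_repeats + 1)).foldl
      (fun best i =>
        let motif := PySem.List.slice cs (some i) (some (i + (K : Int)))
        if PySem.Chars.isIn ['N'] motif then best
        else
          let rep := pvAwhile cs motif (cs.length : Int) (K : Int) (cs.length + 1) 1 (i + (K : Int))
          if min_repeats ≤ rep ∧ best.2.2 < rep then ((K : Int), String.ofList motif, rep) else best)
      best =
    (PySem.List.pyRange 0 ((cs.length : Int) - (K : Int) * min_repeats + 1)).foldl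
      (fun best i =>
        let r := PySem.List.pyGetD
          (((PySem.List.pyRange 0 ((cs.length : Int) - 2 * (K : Int) + 1)).reverse).foldl
            (pvUpd cs (K : Int)) (List.replicate (cs.length + 1) 1)) i 1
        if min_repeats ≤ r ∧ best.2.2 < r ∧
           PySem.Chars.isIn ['N'] (PySem.List.slice cs (some i) (some (i + (K : Int)))) = false then
          ((K : Int), String.ofList (PySem.List.slice cs (some i) (some (i + (K : Int)))), r)
        else best)
      best := by
  apply PySem.List.foldl_congr_mem
  intro acc i hi
  have hmem := PySem.List.mem_pyRange_one.mp hi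
  obtain ⟨I, rfl⟩ : ∃ I : Nat, i = (I : Int) := ⟨i.toNat, by omega⟩
  have hIlt : I < cs.length + 1 := by
    have : 1 ≤ (K : Int) * min_repeats := by
      calc (1 : Int) = 1 * 1 := by ring
      _ ≤ (K : Int) * min_repeats := by
        apply mul_le_mul <;> omega
    omega
  simp only []
  rw [pvSlice_block0, pvAwhile_eq cs K hK (cs.length + 1) I (pvBlock cs K I) 1 rfl (by omega),
    PySem.List.pyGetD_natCast, pvRepList_final cs K hK I hIlt]
  by_cases hN : PySem.Chars.isIn ['N'] (pvBlock cs K I) = true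
  · rw [if_pos hN, if_neg (by rw [hN]; rintro ⟨-, -, h⟩; cases h)]
  · rw [if_neg hN]
    have hN' : PySem.Chars.isIn ['N'] (pvBlock cs K I) = false := by
      cases h : PySem.Chars.isIn ['N'] (pvBlock cs K I)
      · rfl
      · exact absurd h hN
    have harith : 1 + pvRepc cs K hK I - 1 = pvRepc cs K hK I := by ring
    rw [harith]
    by_cases hcond : min_repeats ≤ pvRepc cs K hK I ∧ acc.2.2 < pvRepc cs K hK I
    · rw [if_pos hcond, if_pos ⟨hcond.1, hcond.2, hN'⟩]
    · rw [if_neg hcond, if_neg (by rintro ⟨h1, h2, -⟩; exact hcond ⟨h1, h2⟩)]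

theorem best_tandem_repeat_spec : Claim_equal_best_tandem_repeat := by
  intro seq min_k max_k min_repeats _ hpre
  unfold Spec_best_tandem_repeat best_tandem_repeat best_tandem_repeat_alt
  simp only []
  apply PySem.List.foldl_congr_mem
  intro acc k hk
  have hmem := PySem.List.mem_pyRange_one.mp hk
  obtain ⟨hmr0, hdisj⟩ := hpre
  -- the loop never iterates unless 1 ≤ min_k
  have hk1 : 1 ≤ k := by
    rcases hdisj with h | h | h
    · omega
    · exfalso; have := hmem.2; have := min_le_left max_k
        (PySem.Int.floordiv (seq.toList.length : Int) min_repeats); omega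
    · exfalso; have := hmem.2; have := min_le_right max_k
        (PySem.Int.floordiv (seq.toList.length : Int) min_repeats); omega
  have hkfd : k ≤ PySem.Int.floordiv (seq.toList.length : Int) min_repeats := by
    have := hmem.2
    have := min_le_right max_k (PySem.Int.floordiv (seq.toList.length : Int) min_repeats)
    omega
  -- min_repeats < 0 would force the k-range empty (floordiv ≤ 0 < k)
  have hmr : 1 ≤ min_repeats := by
    by_contra h
    have hneg : min_repeats < 0 := by omega
    have hdm := PySem.Int.floordiv_mul_add_mod (seq.toList.length : Int) min_repeats
    have hmb := PySem.Int.mod_neg_bounds (seq.toList.length : Int) hneg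
    have hlen : (0 : Int) ≤ (seq.toList.length : Int) := by positivity
    -- floordiv * mr = len - mod ≥ 0 and mr < 0 force floordiv ≤ 0, contradicting k ≥ 1
    nlinarith
  obtain ⟨K, rfl⟩ : ∃ K : Nat, k = (K : Int) := ⟨k.toNat, by omega⟩
  exact pvBody_eq seq.toList K (by omega) min_repeats hmr acc
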